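-- pv_equiv track=rewrite | github.com/MrBrantCode/unitest_baseline | mut_generate/mist_train_cf/cf_16494/solution.py | reverse_string_without_vowels_and_duplicates
-- ===== SOURCE A (Python) =====
-- def reverse_string_without_vowels_and_duplicates(string):
--     # Convert the string to lowercase
--     string = string.lower()
--
--     # Create an empty set to store unique characters
--     unique_chars = set()
--
--     # Create a new string to store the reverse characters
--     new_string = ""
--
--     # Iterate through each character in the original string
--     for char in reversed(string):
--         # Ignore vowels
--         if char in "aeiou":
--             continue
--
--         # Ignore duplicate characters
--         if char in unique_chars:
--             continue
--
--         # Add the character to the unique set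
--         unique_chars.add(char)
--
--         # Add the character to the new string
--         new_string += char
--
--     # Return the new string with reversed characters
--     return new_string
-- ===== SOURCE B (Python) =====
-- def reverse_string_without_vowels_and_duplicates(string):
--     # Forward scan: keep each non-vowel character only at its LAST occurrence
--     # (first occurrence in the reversed string = last occurrence forward),
--     # then reverse once at the end.
--     s = string.lower()
--     kept = [c for i, c in enumerate(s) if c not in "aeiou" and c not in s[i+1:]]
--     return "".join(reversed(kept))
-- ===== Notes on version B (the rewrite author's own statement) =====
-- stated objective: alternative
-- what changed: Instead of A's reverse-then-fused-filter/dedup scan with a mutable seen-set, B scans FORWARD with no dedup state, characterising the kept characters as non-vowels at their LAST occurrence (tested by suffix membership c not in s[i+1:]), and reverses once at the end.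
import Mathlib
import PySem

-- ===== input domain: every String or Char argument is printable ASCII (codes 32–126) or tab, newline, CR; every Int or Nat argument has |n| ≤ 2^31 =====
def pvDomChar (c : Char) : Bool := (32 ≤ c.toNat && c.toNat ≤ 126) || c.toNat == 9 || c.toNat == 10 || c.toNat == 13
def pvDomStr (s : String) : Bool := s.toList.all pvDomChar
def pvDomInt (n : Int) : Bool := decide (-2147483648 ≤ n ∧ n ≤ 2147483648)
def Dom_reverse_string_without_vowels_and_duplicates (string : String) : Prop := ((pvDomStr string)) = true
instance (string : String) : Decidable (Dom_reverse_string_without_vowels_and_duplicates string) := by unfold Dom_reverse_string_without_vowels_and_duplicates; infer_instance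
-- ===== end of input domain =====

-- B replaces A's reverse-then-fused-filter/dedup loop (mutable seen-set, string +=) by a
-- forward scan keeping each non-vowel character at its LAST occurrence (suffix membership
-- test), with one final reversal; alternative decomposition, same result.


-- ===== PORT A =====
def reverse_string_without_vowels_and_duplicates (string : String) : String :=
  let s := PySem.Str.lower string
  let res := s.toList.reverse.foldl
    (fun (st : PySem.Set Char × List Char) c =>
      if ['a','e','i','o','u'].contains c then st
      else if PySem.Set.contains st.1 c then st
      else (PySem.Set.add st.1 c, st.2 ++ [c]))
    (PySem.Set.empty, [])
  String.ofList res.2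

-- ===== PORT B =====
-- 'c not in s[i+1:]' with the enumerate index i ≥ 0 is PySem.List.slice with lower bound i+1.
def reverse_string_without_vowels_and_duplicates_alt (string : String) : String :=
  let s := (PySem.Str.lower string).toList
  let kept := (PySem.List.enumerate s 0).filter
    (fun ic => !(['a','e','i','o','u'].contains ic.2)
            && !((PySem.List.slice s (some (ic.1 + 1)) none).contains ic.2))
  String.ofList ((kept.map Prod.snd).reverse)

-- ===== PRECONDITION & SPEC =====
def Spec_reverse_string_without_vowels_and_duplicates (string : String) (out : String) : Prop := out = reverse_string_without_vowels_and_duplicates_alt string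
instance (string : String) (out : String) : Decidable (Spec_reverse_string_without_vowels_and_duplicates string out) := by unfold Spec_reverse_string_without_vowels_and_duplicates; infer_instance

-- ===== CLAIM (what is proved, stated in full; the proofs are below) =====
def Claim_equal_reverse_string_without_vowels_and_duplicates : Prop := ∀ (string : String), Dom_reverse_string_without_vowels_and_duplicates string → Spec_reverse_string_without_vowels_and_duplicates string (reverse_string_without_vowels_and_duplicates string)

-- ===== LEMMAS AND PROOFS =====

-- Recursive specification of B's kept list: each non-vowel char at its last occurrence.
def pvKeepLast (p : Char → Bool) : List Char → List Char
  | [] => []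
  | c :: t => (if p c && !t.contains c then [c] else []) ++ pvKeepLast p t

-- B's enumerate-filter-map expression equals pvKeepLast, generalized over the start index.
theorem pv_enum_filter_eq_keepLast (p : Char → Bool) :
    ∀ (t L : List Char) (n : Nat), L.drop n = t →
    (((PySem.List.enumerate t (n : Int)).filter
        (fun ic => p ic.2 && !((PySem.List.slice L (some (ic.1 + 1)) none).contains ic.2))).map
      Prod.snd) = pvKeepLast p t := by
  intro t
  induction t with
  | nil => intro L n _; simp [PySem.List.enumerate_nil, pvKeepLast]
  | cons c r ih =>
    intro L n h
    have hdr : L.drop (n + 1) = r := by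
      have := congrArg List.tail h
      simpa [List.tail_drop] using this
    have hslice : PySem.List.slice L (some ((n : Int) + 1)) none = r := by
      have : ((n : Int) + 1) = ((n + 1 : Nat) : Int) := by push_cast; ring
      rw [this, PySem.List.slice_from_natCast, hdr]
    rw [PySem.List.enumerate_cons, List.filter_cons]
    simp only [hslice]
    by_cases hk : (p c && !r.contains c) = true
    · rw [if_pos (by simpa using hk)]
      rw [List.map_cons]
      have := ih L (n + 1) hdr
      rw [show ((n : Int) + 1) = ((n + 1 : Nat) : Int) by push_cast; ring, this]
      have hk' : p c = true ∧ c ∉ r := by simpa using hk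
      simp [pvKeepLast, hk'.1, hk'.2]
    · rw [if_neg (by simpa using hk)]
      have := ih L (n + 1) hdr
      rw [show ((n : Int) + 1) = ((n + 1 : Nat) : Int) by push_cast; ring, this]
      simp only [pvKeepLast]
      rw [if_neg (by simpa using hk), List.nil_append]

-- Appending one element to an ordered dedup (dict.fromkeys keeps FIRST occurrences).
theorem pv_dedup_append_singleton (xs : List Char) (c : Char) :
    PySem.List.dedup (xs ++ [c]) =
      PySem.List.dedup xs ++ (if xs.contains c then [] else [c]) := by
  simp only [PySem.List.dedup_eq_ofList, PySem.Set.ofList_eq_foldl, List.foldl_append,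
    List.foldl_cons, List.foldl_nil]
  by_cases hc : c ∈ xs
  · have : c ∈ xs.foldl PySem.Set.add [] := by
      have : c ∈ PySem.Set.ofList xs := by simpa [PySem.Set.mem_ofList] using hc
      simpa [PySem.Set.ofList_eq_foldl] using this
    simp [PySem.Set.add, this, hc]
  · have : c ∉ xs.foldl PySem.Set.add [] := by
      intro hmem
      exact hc (by simpa [PySem.Set.mem_ofList] using
        (show c ∈ PySem.Set.ofList xs by simpa [PySem.Set.ofList_eq_foldl] using hmem))
    simp [PySem.Set.add, this, hc]

-- A's fused loop equals fold of Set.add over the filtered list (seen-set = output list).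
theorem pv_fused_eq_filter_fold (l : List Char) (s : PySem.Set Char) :
    l.foldl
      (fun (st : PySem.Set Char × List Char) c =>
        if ['a','e','i','o','u'].contains c then st
        else if PySem.Set.contains st.1 c then st
        else (PySem.Set.add st.1 c, st.2 ++ [c]))
      (s, s)
    = (((l.filter (fun c => !(['a','e','i','o','u'].contains c))).foldl PySem.Set.add s),
       ((l.filter (fun c => !(['a','e','i','o','u'].contains c))).foldl PySem.Set.add s)) := by
  induction l generalizing s with
  | nil => rfl
  | cons c rest ih =>
    rw [List.foldl_cons, List.filter_cons]
    by_cases hv : ['a','e','i','o','u'].contains c = true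
    · rw [if_pos hv, hv]
      simp only [Bool.not_true, Bool.false_eq_true, if_false]
      exact ih s
    · have hvf : ['a','e','i','o','u'].contains c = false := by
        cases h : ['a','e','i','o','u'].contains c
        · rfl
        · exact absurd h hv
      rw [hvf] at hv ⊢
      simp only [Bool.not_false, Bool.false_eq_true, if_false, if_true]
      by_cases hm : PySem.Set.contains s c = true
      · have hmem : c ∈ s := by simpa using hm
        have hadd : PySem.Set.add s c = s := by simp [PySem.Set.add, hmem]
        rw [if_pos hm, List.foldl_cons, hadd]
        exact ih s
      · have hmem : c ∉ s := by simpa using hm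
        have hadd : PySem.Set.add s c = s ++ [c] := by simp [PySem.Set.add, hmem]
        rw [if_neg hm, List.foldl_cons, hadd]
        exact ih (s ++ [c])

-- Core equivalence on the list side: dedup of the filtered reversed list is the reverse
-- of the keep-last-occurrence forward scan.
theorem pv_dedup_filter_reverse (p : Char → Bool) (l : List Char) :
    PySem.List.dedup (l.reverse.filter p) = (pvKeepLast p l).reverse := by
  induction l with
  | nil => rfl
  | cons c t ih =>
    rw [List.reverse_cons, List.filter_append, List.filter_cons, List.filter_nil]
    by_cases hp : p c = true
    · rw [if_pos hp, pv_dedup_append_singleton, ih]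
      have hmem : (t.reverse.filter p).contains c = (t.contains c) := by
        simp [hp]
      rw [hmem]
      by_cases ht : t.contains c = true
      · have htm : c ∈ t := by simpa using ht
        simp [pvKeepLast, htm]
      · have htm : c ∉ t := by simpa using ht
        simp [pvKeepLast, htm, hp]
    · rw [if_neg (by simp [hp]), List.append_nil, ih]
      simp [pvKeepLast, hp]

-- ===== VERDICT (by name: the statement is the Claim_ definition above) =====
theorem reverse_string_without_vowels_and_duplicates_spec : Claim_equal_reverse_string_without_vowels_and_duplicates := by
  intro string _
  unfold Spec_reverse_string_without_vowels_and_duplicates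
  unfold reverse_string_without_vowels_and_duplicates reverse_string_without_vowels_and_duplicates_alt
  simp only []
  rw [show (PySem.Set.empty : PySem.Set Char) = ([] : List Char) from rfl]
  rw [pv_fused_eq_filter_fold]
  have hB := pv_enum_filter_eq_keepLast (fun c => !(['a','e','i','o','u'].contains c))
    ((PySem.Str.lower string).toList) ((PySem.Str.lower string).toList) 0 (by simp)
  simp only [Nat.cast_zero] at hB
  rw [hB, ← pv_dedup_filter_reverse]
  simp [PySem.List.dedup_eq_ofList, PySem.Set.ofList_eq_foldl]
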